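-- pv_equiv track=rewrite | github.com/ferretv3/python_projects | python_work/lab09b.py | build_word_index
-- ===== SOURCE A (Python) =====
-- import string
--
-- def build_word_index( input_file ):
--
--     word_map = {}
--
--     for index,line in enumerate(input_file):
--
--         line = line.split()
--
--         for word in line:
--             word = word.lower().strip(string.punctuation)
--             if word.isalpha():
--                 if word not in word_map:
--                     word_map.setdefault(word,[]).append(index+1)
--                 elif word in word_map and index + 1 not in word_map[word]:
--                     word_map.setdefault(word,[]).append(index+1)
--
--
--     return word_map
-- ===== SOURCE B (Python) =====
-- import string
--
-- def build_word_index(input_file):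
--     # Pass 1: extract a flat table of (line number, cleaned word) pairs.
--     pairs = []
--     for lineno, line in enumerate(input_file, start=1):
--         for raw in line.split():
--             w = raw.lower().strip(string.punctuation)
--             if w.isalpha():
--                 pairs.append((lineno, w))
--     # Pass 2: group by word; line numbers arrive in nondecreasing order,
--     # so comparing against the last recorded line number suffices.
--     word_map = {}
--     for lineno, w in pairs:
--         lines = word_map.setdefault(w, [])
--         if not lines or lines[-1] != lineno:
--             lines.append(lineno)
--     return word_map
-- ===== Notes on version B (the rewrite author's own statement) =====
-- stated objective: faster
-- what changed: B splits the work into two passes - first a flat extraction of (lineno, word) pairs, then a grouping pass that deduplicates by comparing only the last recorded line number (exploiting monotonicity of line numbers) - instead of A's single nested loop that scans the whole word_map[word] list with 'lineno not in word_map[word]' for every word occurrence.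
import Mathlib
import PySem

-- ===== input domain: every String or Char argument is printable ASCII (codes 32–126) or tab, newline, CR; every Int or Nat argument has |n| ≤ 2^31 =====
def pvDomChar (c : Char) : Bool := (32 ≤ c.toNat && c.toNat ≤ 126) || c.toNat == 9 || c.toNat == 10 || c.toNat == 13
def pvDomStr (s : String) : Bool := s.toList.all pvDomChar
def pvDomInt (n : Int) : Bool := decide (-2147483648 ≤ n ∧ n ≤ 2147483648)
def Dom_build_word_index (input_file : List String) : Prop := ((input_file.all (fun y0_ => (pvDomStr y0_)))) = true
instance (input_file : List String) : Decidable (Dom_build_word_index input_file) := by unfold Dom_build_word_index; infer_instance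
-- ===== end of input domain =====

-- B reorganises A's single nested loop into two passes: flat extraction of (lineno, word)
-- pairs, then a grouping pass that dedups by the LAST recorded line number instead of A's
-- per-occurrence membership scan of word_map[word] (a timing run measured B faster);
-- equal return value is proved for all inputs (both are total).

-- string.punctuation (module constant of the Python source)
def pvPunct : String := "!\"#$%&'()*+,-./:;<=>?@[\\]^_`{|}~"

-- ===== PORT A =====
def build_word_index (input_file : List String) : List (String × List Int) :=
  ((PySem.List.enumerate input_file 0).foldl (fun word_map p =>
      (PySem.Str.split₀ p.2).foldl (fun word_map w =>
        let word := PySem.Str.stripChars (PySem.Str.lower w) pvPunct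
        if PySem.Str.strIsalpha word then
          if !(word_map.contains word) then
            let d2 := word_map.setdefault word []
            d2.insert word (d2.getD word [] ++ [p.1 + 1])
          else if word_map.contains word && !((word_map.getD word []).contains (p.1 + 1)) then
            let d2 := word_map.setdefault word []
            d2.insert word (d2.getD word [] ++ [p.1 + 1])
          else word_map
        else word_map) word_map)
    (PySem.Dict.empty : PySem.Dict String (List Int))).items

-- ===== PORT B =====
def build_word_index_alt (input_file : List String) : List (String × List Int) :=
  -- pass 1: flat extraction
  let pairs : List (Int × String) :=
    (PySem.List.enumerate input_file 1).foldl (fun acc p =>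
      (PySem.Str.split₀ p.2).foldl (fun acc raw =>
        let w := PySem.Str.stripChars (PySem.Str.lower raw) pvPunct
        if PySem.Str.strIsalpha w then acc ++ [(p.1, w)] else acc) acc) []
  -- pass 2: grouping with last-element dedup
  let word_map : PySem.Dict String (List Int) :=
    pairs.foldl (fun d q =>
      let d2 := d.setdefault q.2 []
      let lines := d2.getD q.2 []
      if lines.isEmpty || !(PySem.List.pyGetD lines (-1) 0 == q.1) then
        d2.insert q.2 (lines ++ [q.1])
      else d2) PySem.Dict.empty
  word_map.items

-- ===== PRECONDITION & SPEC =====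
def Spec_build_word_index (input_file : List String) (out : List (String × List Int)) : Prop := out = build_word_index_alt input_file
instance (input_file : List String) (out : List (String × List Int)) : Decidable (Spec_build_word_index input_file out) := by unfold Spec_build_word_index; infer_instance

-- ===== CLAIM (what is proved, stated in full; the proofs are below) =====
def Claim_equal_build_word_index : Prop := ∀ (input_file : List String), Dom_build_word_index input_file → Spec_build_word_index input_file (build_word_index input_file)

-- ===== LEMMAS AND PROOFS =====

-- cleaned word
def pvClean (w : String) : String := PySem.Str.stripChars (PySem.Str.lower w) pvPunct

-- A's per-word step after the isalpha test, on (lineno, cleaned word)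
def pvAStep' (d : PySem.Dict String (List Int)) (q : Int × String) : PySem.Dict String (List Int) :=
  if !(d.contains q.2) then
    let d2 := d.setdefault q.2 []
    d2.insert q.2 (d2.getD q.2 [] ++ [q.1])
  else if d.contains q.2 && !((d.getD q.2 []).contains q.1) then
    let d2 := d.setdefault q.2 []
    d2.insert q.2 (d2.getD q.2 [] ++ [q.1])
  else d

def pvAStep (d : PySem.Dict String (List Int)) (q : Int × String) : PySem.Dict String (List Int) :=
  if PySem.Str.strIsalpha (pvClean q.2) then pvAStep' d (q.1, pvClean q.2) else d

-- B's grouping step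
def pvBStep (d : PySem.Dict String (List Int)) (q : Int × String) : PySem.Dict String (List Int) :=
  let d2 := d.setdefault q.2 []
  let lines := d2.getD q.2 []
  if lines.isEmpty || !(PySem.List.pyGetD lines (-1) 0 == q.1) then
    d2.insert q.2 (lines ++ [q.1])
  else d2

-- the flat (lineno, raw word) list both folds run over
def pvFlat (xs : List String) : List (Int × String) :=
  (PySem.List.enumerate xs 1).flatMap (fun p => (PySem.Str.split₀ p.2).map (fun w => (p.1, w)))

def pvH (q : Int × String) : Option (Int × String) :=
  if PySem.Str.strIsalpha (pvClean q.2) then some (q.1, pvClean q.2) else none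

lemma pv_foldl_flatMap {α β σ : Type} (l : List α) (f : α → List β) (g : σ → β → σ) (init : σ) :
    (l.flatMap f).foldl g init = l.foldl (fun acc x => (f x).foldl g acc) init := by
  induction l generalizing init with
  | nil => rfl
  | cons x xs ih => simp [List.flatMap_cons, List.foldl_append, ih]

lemma pv_enumerate_succ {α : Type} (xs : List α) (s : Int) :
    PySem.List.enumerate xs (s + 1) = (PySem.List.enumerate xs s).map (fun p => (p.1 + 1, p.2)) := by
  induction xs generalizing s with
  | nil => rfl
  | cons x xs ih =>
    simp [PySem.List.enumerate_cons, ih (s + 1)]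

-- generic nested loop over lines/words = fold over the flat pair list
lemma pv_nested_eq_flat {σ : Type} (xs : List String) (s : Int) (g : σ → Int × String → σ) (init : σ) :
    (PySem.List.enumerate xs s).foldl (fun acc p =>
        (PySem.Str.split₀ p.2).foldl (fun acc w => g acc (p.1, w)) acc) init
      = ((PySem.List.enumerate xs s).flatMap
          (fun p => (PySem.Str.split₀ p.2).map (fun w => (p.1, w)))).foldl g init := by
  rw [pv_foldl_flatMap]
  congr 1
  funext acc p
  rw [List.foldl_map]

lemma pv_insert_insert_self {ν : Type} (d : PySem.Dict String ν) (k : String) (v w : ν) :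
    (d.insert k v).insert k w = d.insert k w := by
  by_cases hc : d.contains k = true
  · simp only [PySem.Dict.insert, hc, if_true]
    have hany : (PySem.Dict.mk (List.map (fun p => if (p.1 == k) = true then (k, v) else p)
        d.items) : PySem.Dict String ν).contains k = true := by
      simp only [PySem.Dict.contains, List.any_eq_true] at hc ⊢
      obtain ⟨p, hp, hpk⟩ := hc
      exact ⟨(k, v), List.mem_map.mpr ⟨p, hp, by simp [hpk]⟩, by simp⟩
    rw [if_pos hany]
    congr 1
    rw [List.map_map]
    apply List.map_congr_left
    intro p _
    by_cases h : (p.1 == k) = true <;> simp [Function.comp, h]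
  · have hc' : ∀ p ∈ d.items, (p.1 == k) = false := by
      intro p hp
      cases h : (p.1 == k) with
      | true =>
        exact absurd (show d.contains k = true from List.any_eq_true.mpr ⟨p, hp, h⟩) hc
      | false => rfl
    simp only [PySem.Dict.insert, eq_false_of_ne_true hc, Bool.false_eq_true, if_false]
    have h2 : (PySem.Dict.mk (d.items ++ [(k, v)]) : PySem.Dict String ν).contains k = true := by
      simp [PySem.Dict.contains]
    rw [if_pos h2]
    congr 1
    simp only [List.map_append, List.map_cons, List.map_nil, beq_self_eq_true, if_true]
    congr 1
    conv_rhs => rw [← List.map_id d.items]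
    apply List.map_congr_left (fun p hp => by simp [hc' p hp])

lemma pv_foldl_filterMap {α β : Type} (f : α → Option β) (l : List α) (init : List β) :
    (l.filterMap f).foldl (fun acc y => acc ++ [y]) init
      = l.foldl (fun acc q => (f q).elim acc (fun y => acc ++ [y])) init := by
  induction l generalizing init with
  | nil => rfl
  | cons x xs ih => cases h : f x <;> simp [h, ih]

lemma pv_foldl_snoc {α : Type} (l : List α) (a : List α) :
    l.foldl (fun acc y => acc ++ [y]) a = a ++ l := by
  induction l generalizing a with
  | nil => simp
  | cons x xs ih => simp [ih]

lemma pv_A_eq_flat (xs : List String) :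
    build_word_index xs = ((pvFlat xs).foldl pvAStep PySem.Dict.empty).items := by
  unfold build_word_index pvFlat
  rw [← pv_nested_eq_flat xs 1 pvAStep]
  have h : PySem.List.enumerate xs 1
      = (PySem.List.enumerate xs 0).map (fun p => (p.1 + 1, p.2)) := by
    simpa using pv_enumerate_succ xs 0
  rw [h, List.foldl_map]
  rfl

lemma pv_B_pairs (xs : List String) :
    ((PySem.List.enumerate xs 1).foldl (fun acc p =>
      (PySem.Str.split₀ p.2).foldl (fun acc raw =>
        let w := PySem.Str.stripChars (PySem.Str.lower raw) pvPunct
        if PySem.Str.strIsalpha w then acc ++ [(p.1, w)] else acc) acc) ([] : List (Int × String)))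
    = (pvFlat xs).filterMap pvH := by
  have h1 := pv_nested_eq_flat xs 1
    (fun acc (q : Int × String) =>
      if PySem.Str.strIsalpha (pvClean q.2) then acc ++ [(q.1, pvClean q.2)] else acc)
    ([] : List (Int × String))
  refine Eq.trans (Eq.trans (by rfl) h1) ?_
  have hg : (fun acc (q : Int × String) =>
      if PySem.Str.strIsalpha (pvClean q.2) then acc ++ [(q.1, pvClean q.2)] else acc)
    = (fun acc (q : Int × String) => (pvH q).elim acc (fun y => acc ++ [y])) := by
    funext acc q
    unfold pvH
    by_cases h : PySem.Chars.strIsalpha (pvClean q.2).toList = true <;> simp [h]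
  rw [hg, ← pv_foldl_filterMap pvH, pv_foldl_snoc, List.nil_append]
  rfl

-- the invariant-carrying core lemma
lemma pv_core (pairs : List (Int × String)) : ∀ (d : PySem.Dict String (List Int)),
    pairs.Pairwise (fun a b => a.1 ≤ b.1) →
    (∀ w, d.contains w = true →
      d.getD w [] ≠ [] ∧ (d.getD w []).IsChain (· < ·) ∧
      ∀ m ∈ d.getD w [], ∀ q ∈ pairs, m ≤ q.1) →
    pairs.foldl pvAStep' d = pairs.foldl pvBStep d := by
  induction pairs with
  | nil => intro d _ _; rfl
  | cons q rest ih =>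
    intro d hp hd
    rw [List.pairwise_cons] at hp
    obtain ⟨hq1, hp'⟩ := hp
    rw [List.foldl_cons, List.foldl_cons]
    by_cases hc : d.contains q.2 = true
    · obtain ⟨hne, hch, hle⟩ := hd q.2 hc
      set lines := d.getD q.2 [] with hl
      have hie : lines.isEmpty = false := by
        cases hlc : lines with
        | nil => exact absurd hlc hne
        | cons a as => rfl
      have hglmem : lines.getLast hne ∈ lines := List.getLast_mem hne
      have hgl_le : lines.getLast hne ≤ q.1 := hle _ hglmem q (List.mem_cons_self)
      have hsd : d.setdefault q.2 [] = d := PySem.Dict.setdefault_of_contains d [] hc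
      have hpg : PySem.List.pyGetD lines (-1) 0 = lines.getLast hne :=
        PySem.List.pyGetD_neg_one lines 0 hne
      have hmem : q.1 ∈ lines ↔ lines.getLast hne = q.1 := by
        constructor
        · intro hq
          by_contra hne2
          have hdecomp := List.dropLast_append_getLast hne
          have hpw : lines.Pairwise (· < ·) := List.isChain_iff_pairwise.mp hch
          rw [← hdecomp] at hpw hq
          rcases List.mem_append.mp hq with h | h
          · have hlt := (List.pairwise_append.mp hpw).2.2 q.1 h (lines.getLast hne) (by simp)
            exact absurd (lt_of_lt_of_le hlt hgl_le) (lt_irrefl _)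
          · simp at h
            exact hne2 h.symm
        · intro h
          exact h ▸ hglmem
      have hInv : lines.getLast hne ≠ q.1 → ∀ w, (d.insert q.2 (lines ++ [q.1])).contains w = true →
          (d.insert q.2 (lines ++ [q.1])).getD w [] ≠ [] ∧
          ((d.insert q.2 (lines ++ [q.1])).getD w []).IsChain (· < ·) ∧
          ∀ m ∈ (d.insert q.2 (lines ++ [q.1])).getD w [], ∀ r ∈ rest, m ≤ r.1 := by
        intro hgl w hw
        by_cases hwq : w = q.2
        · subst hwq
          rw [PySem.Dict.getD_insert_self]
          refine ⟨by simp, ?_, ?_⟩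
          · rw [List.isChain_append]
            refine ⟨hch, by simp, ?_⟩
            intro x hx y hy
            rw [List.getLast?_eq_some_getLast hne] at hx
            simp only [Option.mem_def, Option.some.injEq] at hx
            simp only [List.head?_cons, Option.mem_def, Option.some.injEq] at hy
            subst hx; subst hy
            exact lt_of_le_of_ne hgl_le hgl
          · intro m hm r hr
            rcases List.mem_append.mp hm with h | h
            · exact hle m h r (List.mem_cons_of_mem _ hr)
            · simp at h
              subst h
              exact hq1 r hr
        · have hw' : d.contains w = true := by
            rw [PySem.Dict.contains_insert] at hw
            simpa [hwq] using hw
          rw [PySem.Dict.getD_insert, if_neg hwq]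
          exact ⟨(hd w hw').1, (hd w hw').2.1,
            fun m hm r hr => (hd w hw').2.2 m hm r (List.mem_cons_of_mem _ hr)⟩
      by_cases hq : q.1 ∈ lines
      · have hgl : lines.getLast hne = q.1 := hmem.mp hq
        have hcon : lines.contains q.1 = true := List.contains_iff_mem.mpr hq
        have hA : pvAStep' d q = d := by
          have hcon' : (d.getD q.2 []).contains q.1 = true := hcon
          simp only [pvAStep', hc, hcon', Bool.not_true, Bool.true_and,
            Bool.false_eq_true, if_false]
        have hB : pvBStep d q = d := by
          simp [pvBStep, hsd, ← hl, hie, hpg, hgl]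
        rw [hA, hB]
        exact ih d hp' (fun w hw => ⟨(hd w hw).1, (hd w hw).2.1,
          fun m hm r hr => (hd w hw).2.2 m hm r (List.mem_cons_of_mem _ hr)⟩)
      · have hgl : lines.getLast hne ≠ q.1 := fun h => hq (hmem.mpr h)
        have hcon : lines.contains q.1 = false := by
          rw [Bool.eq_false_iff]
          intro h
          exact hq (List.contains_iff_mem.mp h)
        have hA : pvAStep' d q = d.insert q.2 (lines ++ [q.1]) := by
          simp only [pvAStep', hc, Bool.not_true, Bool.false_eq_true, if_false, hcon,
            Bool.not_false, Bool.and_true, if_true, hsd, ← hl]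
        have hB : pvBStep d q = d.insert q.2 (lines ++ [q.1]) := by
          simp [pvBStep, hsd, ← hl, hie, hpg, hgl]
        rw [hA, hB]
        exact ih _ hp' (hInv hgl)
    · have hc' : d.contains q.2 = false := eq_false_of_ne_true hc
      have hgd : d.getD q.2 [] = [] := PySem.Dict.getD_of_not_contains d [] hc'
      have hsd : d.setdefault q.2 [] = d.insert q.2 [] :=
        PySem.Dict.setdefault_of_not_contains d [] hc'
      have hA : pvAStep' d q = d.insert q.2 [q.1] := by
        simp [pvAStep', hc', hsd, PySem.Dict.getD_insert_self, pv_insert_insert_self]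
      have hB : pvBStep d q = d.insert q.2 [q.1] := by
        simp [pvBStep, hsd, PySem.Dict.getD_insert_self, pv_insert_insert_self]
      rw [hA, hB]
      apply ih _ hp'
      intro w hw
      by_cases hwq : w = q.2
      · subst hwq
        rw [PySem.Dict.getD_insert_self]
        refine ⟨by simp, by simp, ?_⟩
        intro m hm r hr
        simp at hm
        subst hm
        exact hq1 r hr
      · have hw' : d.contains w = true := by
          rw [PySem.Dict.contains_insert] at hw
          simpa [hwq] using hw
        rw [PySem.Dict.getD_insert, if_neg hwq]
        exact ⟨(hd w hw').1, (hd w hw').2.1,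
          fun m hm r hr => (hd w hw').2.2 m hm r (List.mem_cons_of_mem _ hr)⟩

lemma pv_pairwise_const {α : Type} (l : List α) {P : Prop} (h : P) :
    l.Pairwise (fun _ _ => P) := by
  induction l with
  | nil => exact .nil
  | cons x xs ih => exact .cons (fun _ _ => h) ih

lemma pv_flat_pairwise (xs : List String) :
    (pvFlat xs).Pairwise (fun a b => a.1 ≤ b.1) := by
  unfold pvFlat
  rw [List.pairwise_flatMap]
  constructor
  · intro a _
    rw [List.pairwise_map]
    exact pv_pairwise_const _ (le_refl a.1)
  · refine (PySem.List.pairwise_lt_enumerate xs 1).imp ?_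
    intro a b hab x hx y hy
    obtain ⟨w, _, rfl⟩ := List.mem_map.mp hx
    obtain ⟨w', _, rfl⟩ := List.mem_map.mp hy
    exact le_of_lt hab

lemma pv_foldl_filterMap_elim {α β γ : Type} (f : α → Option β) (g : γ → β → γ)
    (l : List α) (init : γ) :
    (l.filterMap f).foldl g init = l.foldl (fun x q => (f q).elim x (g x)) init := by
  induction l generalizing init with
  | nil => rfl
  | cons x xs ih => cases h : f x <;> simp [h, ih]

lemma pvH_fst (q : Int × String) (y : Int × String) (h : pvH q = some y) : y.1 = q.1 := by
  unfold pvH at h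
  by_cases ha : PySem.Str.strIsalpha (pvClean q.2) = true
  · rw [if_pos ha] at h
    cases h
    rfl
  · rw [if_neg ha] at h
    cases h

set_option maxHeartbeats 1000000 in
theorem pv_main (xs : List String) : build_word_index xs = build_word_index_alt xs := by
  rw [pv_A_eq_flat]
  have hB : build_word_index_alt xs
      = (((pvFlat xs).filterMap pvH).foldl pvBStep PySem.Dict.empty).items := by
    show ((((PySem.List.enumerate xs 1).foldl (fun acc p =>
      (PySem.Str.split₀ p.2).foldl (fun acc raw =>
        let w := PySem.Str.stripChars (PySem.Str.lower raw) pvPunct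
        if PySem.Str.strIsalpha w then acc ++ [(p.1, w)] else acc) acc) []).foldl
          pvBStep PySem.Dict.empty).items) = _
    rw [pv_B_pairs]
  rw [hB]
  have hAfn : pvAStep = fun (d : PySem.Dict String (List Int)) (q : Int × String) =>
      (pvH q).elim d (pvAStep' d) := by
    funext d q
    unfold pvAStep pvH
    by_cases h : PySem.Chars.strIsalpha (pvClean q.2).toList = true <;> simp [h]
  have hdict : (pvFlat xs).foldl pvAStep PySem.Dict.empty
      = ((pvFlat xs).filterMap pvH).foldl pvBStep PySem.Dict.empty := by
    rw [hAfn, ← pv_foldl_filterMap_elim pvH pvAStep']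
    apply pv_core
    · rw [List.pairwise_filterMap]
      refine (pv_flat_pairwise xs).imp ?_
      intro a b hab y hy y' hy'
      rw [pvH_fst a y hy, pvH_fst b y' hy']
      exact hab
    · intro w hw
      rw [PySem.Dict.contains_empty] at hw
      cases hw
  exact congrArg (fun d => d.items) hdict

-- ===== VERDICT (by name: the statement is the Claim_ definition above) =====
theorem build_word_index_spec : Claim_equal_build_word_index := by
  intro xs _
  unfold Spec_build_word_index
  exact pv_main xs
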